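-- pv_equiv track=rewrite | github.com/inglesp/comparing-school-performance | scripts/report_ofsted.py | grade_counter
-- ===== SOURCE A (Python) =====
-- from collections import Counter
--
-- GRADE_LABELS = {"1": "Outstanding", "2": "Good", "3": "Requires improvement", "4": "Inadequate", "9": "N/A"}
--
-- def grade_counter(rows, col):
--     """Count grades, labelling them."""
--     raw = Counter(r.get(col, "") or "" for r in rows)
--     labelled = Counter()
--     for k, v in raw.items():
--         k = k.strip()
--         if k == "" or k == "NULL":
--             labelled["(empty/NULL)"] += v
--         elif k in GRADE_LABELS:
--             labelled[f"{k} – {GRADE_LABELS[k]}"] += v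
--         else:
--             labelled[k] += v
--     return labelled
-- ===== SOURCE B (Python) =====
-- from collections import Counter
--
-- GRADE_LABELS = {"1": "Outstanding", "2": "Good", "3": "Requires improvement", "4": "Inadequate", "9": "N/A"}
--
--
-- def _label(value):
--     """Map one raw cell value to its display key."""
--     k = value.strip()
--     if k == "" or k == "NULL":
--         return "(empty/NULL)"
--     if k in GRADE_LABELS:
--         return f"{k} – {GRADE_LABELS[k]}"
--     return k
--
--
-- def grade_counter(rows, col):
--     """Count grades, labelling them: one fused transform-then-count pass."""
--     return Counter(_label(r.get(col, "") or "") for r in rows)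
-- ===== Notes on version B (the rewrite author's own statement) =====
-- stated objective: simpler
-- what changed: B maps each raw cell directly to its display label with a small helper and counts in a single Counter pass, eliminating A's intermediate raw Counter and its second relabelling loop over the distinct raw keys (transform-then-aggregate instead of aggregate-then-transform).
import Mathlib
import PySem

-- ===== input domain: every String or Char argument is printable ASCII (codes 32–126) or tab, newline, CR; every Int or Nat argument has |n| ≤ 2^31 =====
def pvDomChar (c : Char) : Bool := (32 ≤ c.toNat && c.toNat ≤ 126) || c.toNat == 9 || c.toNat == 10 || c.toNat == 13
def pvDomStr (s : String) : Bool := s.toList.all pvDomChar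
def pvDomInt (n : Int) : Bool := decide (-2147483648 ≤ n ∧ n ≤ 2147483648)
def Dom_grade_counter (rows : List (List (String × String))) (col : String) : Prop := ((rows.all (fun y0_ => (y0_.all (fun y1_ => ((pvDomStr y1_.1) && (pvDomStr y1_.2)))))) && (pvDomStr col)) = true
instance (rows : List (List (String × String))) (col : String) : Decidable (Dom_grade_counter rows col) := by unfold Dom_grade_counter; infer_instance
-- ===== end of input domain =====

-- B fuses A's two passes into one: a helper maps each raw cell to its display label and a
-- single Counter pass counts the labels, dropping A's intermediate raw Counter and its
-- second relabelling loop (objective: simpler).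

def GRADE_LABELS : PySem.Dict String String :=
  PySem.Dict.ofList [("1", "Outstanding"), ("2", "Good"), ("3", "Requires improvement"),
                     ("4", "Inadequate"), ("9", "N/A")]

-- ===== PORT A =====
def grade_counter (rows : List (List (String × String))) (col : String) : List (String × Int) :=
  -- raw = Counter(r.get(col, "") or "" for r in rows)
  let raw : PySem.Dict String Int := PySem.Dict.counter (rows.map (fun r =>
    let v := (PySem.Dict.mk r).getD col ""
    if v = "" then "" else v))
  -- for k, v in raw.items(): …   (labelled[·] += v  ≡  modify · 0 (· + v))
  let labelled : PySem.Dict String Int := raw.items.foldl (fun d kv =>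
    let k := PySem.Str.strip kv.1
    if k = "" ∨ k = "NULL" then d.modify "(empty/NULL)" 0 (· + kv.2)
    else if GRADE_LABELS.contains k then
      d.modify (k ++ " – " ++ GRADE_LABELS.getD k "") 0 (· + kv.2)
    else d.modify k 0 (· + kv.2)) PySem.Dict.empty
  labelled.items

-- ===== PORT B =====
def labelCell (value : String) : String :=
  let k := PySem.Str.strip value
  if k = "" ∨ k = "NULL" then "(empty/NULL)"
  else if GRADE_LABELS.contains k then k ++ " – " ++ GRADE_LABELS.getD k ""
  else k

def grade_counter_alt (rows : List (List (String × String))) (col : String) : List (String × Int) :=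
  -- Counter(_label(r.get(col, "") or "") for r in rows)
  (PySem.Dict.counter (rows.map (fun r =>
    let v := (PySem.Dict.mk r).getD col ""
    labelCell (if v = "" then "" else v)))).items

-- ===== PRECONDITION & SPEC =====
def Spec_grade_counter (rows : List (List (String × String))) (col : String) (out : List (String × Int)) : Prop := out = grade_counter_alt rows col
instance (rows : List (List (String × String))) (col : String) (out : List (String × Int)) : Decidable (Spec_grade_counter rows col out) := by unfold Spec_grade_counter; infer_instance

-- ===== CLAIM (what is proved, stated in full; the proofs are below) =====
def Claim_equal_grade_counter : Prop := ∀ (rows : List (List (String × String))) (col : String), Dom_grade_counter rows col → Spec_grade_counter rows col (grade_counter rows col)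

-- ===== LEMMAS AND PROOFS =====

-- A key absent from an association list looks up to none.
theorem get?_of_not_mem_keys (l : List (String × Int)) (k : String)
    (h : k ∉ l.map Prod.fst) : (PySem.Dict.mk l).get? k = none := by
  simp only [PySem.Dict.get?, Option.map_eq_none_iff, List.find?_eq_none]
  intro p hp hbeq
  exact h (List.mem_map.mpr ⟨p, hp, by simpa using (beq_iff_eq.mp hbeq)⟩)

-- An association list with nodup keys is determined by its key list and its lookups.
theorem assoc_eq (l l' : List (String × Int)) (h1 : (l.map Prod.fst).Nodup)
    (hk : l.map Prod.fst = l'.map Prod.fst)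
    (hg : ∀ c, (PySem.Dict.mk l).getD c 0 = (PySem.Dict.mk l').getD c 0) : l = l' := by
  induction l generalizing l' with
  | nil => cases l' with
    | nil => rfl
    | cons q t' => simp at hk
  | cons p t ih =>
    cases l' with
    | nil => simp at hk
    | cons q t' =>
      obtain ⟨a, v⟩ := p
      obtain ⟨b, w⟩ := q
      simp only [List.map_cons, List.cons.injEq] at hk
      obtain ⟨hfst, htl⟩ := hk
      simp only [List.map_cons, List.nodup_cons] at h1
      have hv : v = w := by
        have := hg a
        simp [PySem.Dict.getD, PySem.Dict.get?_mk_cons, hfst] at this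
        exact this
      have htail : t = t' := by
        apply ih t' h1.2 htl
        intro c
        by_cases hc : c = a
        · subst hc
          rw [PySem.Dict.getD, get?_of_not_mem_keys t c h1.1,
              PySem.Dict.getD, get?_of_not_mem_keys t' c (by rw [← htl]; exact h1.1)]
        · have := hg c
          simp only [PySem.Dict.getD, PySem.Dict.get?_mk_cons,
                show (a == c) = false from beq_eq_false_iff_ne.mpr (Ne.symm hc),
                show (b == c) = false from beq_eq_false_iff_ne.mpr (hfst ▸ Ne.symm hc)] at this
          simpa [PySem.Dict.getD] using this
      rw [hfst, hv, htail]

theorem dict_eq_of_keys_getD (d d' : PySem.Dict String Int) (h1 : d.keys.Nodup)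
    (hk : d.keys = d'.keys) (hg : ∀ c, d.getD c 0 = d'.getD c 0) : d = d' := by
  cases d with | mk l => cases d' with | mk l' =>
  exact PySem.Dict.ext (assoc_eq l l' h1 hk hg)

-- getD of the relabelling fold: sum of the values whose relabelled key is c.
theorem getD_relabel_fold (f : String → String) (l : List (String × Int))
    (d : PySem.Dict String Int) (c : String) :
    (l.foldl (fun d p => d.modify (f p.1) 0 (· + p.2)) d).getD c 0
      = d.getD c 0 + ((l.filter (fun p => f p.1 == c)).map (·.2)).sum := by
  induction l generalizing d with
  | nil => simp
  | cons p t ih =>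
    simp only [List.foldl_cons, List.filter_cons]
    rw [ih]
    by_cases h : f p.1 = c
    · simp [h]; ring
    · simp [h, PySem.Dict.getD_modify, Ne.symm h]

theorem ofList_append_singleton (l : List String) (a : String) :
    PySem.Set.ofList (l ++ [a]) = PySem.Set.add (PySem.Set.ofList l) a := by
  simp [PySem.Set.ofList, List.foldl_append]

theorem add_of_mem (s : PySem.Set String) (a : String) (h : a ∈ s) :
    PySem.Set.add s a = s := by
  simp [PySem.Set.add, PySem.Set.contains, h]

theorem add_of_not_mem (s : PySem.Set String) (a : String) (h : a ∉ s) :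
    PySem.Set.add s a = s ++ [a] := by
  simp [PySem.Set.add, PySem.Set.contains, h]

-- The distinct labels of the distinct raw values are the distinct labels, in the same order.
theorem ofList_map_ofList (f : String → String) (vs : List String) :
    PySem.Set.ofList ((PySem.Set.ofList vs).map f) = PySem.Set.ofList (vs.map f) := by
  induction vs using List.reverseRecOn with
  | nil => rfl
  | append_singleton t x ih =>
    rw [ofList_append_singleton, List.map_append, List.map_singleton, ofList_append_singleton]
    by_cases h : x ∈ t
    · rw [add_of_mem _ x ((PySem.Set.mem_ofList t x).mpr h), ih,
          add_of_mem _ (f x) ((PySem.Set.mem_ofList (t.map f) (f x)).mpr (List.mem_map_of_mem h))]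
    · rw [add_of_not_mem _ x (fun hc => h ((PySem.Set.mem_ofList t x).mp hc)),
          List.map_append, List.map_singleton, ofList_append_singleton, ih]

theorem sum_map_ite_mem (M : List String) (hN : M.Nodup) (v : String) :
    (M.map (fun k => if k = v then (1 : Int) else 0)).sum
      = if v ∈ M then (1 : Int) else 0 := by
  induction M with
  | nil => simp
  | cons a t ih =>
    simp only [List.nodup_cons] at hN
    simp only [List.map_cons, List.sum_cons, ih hN.2, List.mem_cons]
    by_cases h : a = v
    · subst h
      simp [hN.1]
    · simp [h, Ne.symm h]

-- Summing counts of the distinct raw values that relabel to c counts the relabelled list.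
theorem sum_count_filter (f : String → String) (vs L : List String) (hN : L.Nodup)
    (hsub : ∀ v ∈ vs, v ∈ L) (c : String) :
    ((L.filter (fun k => f k == c)).map (fun k => (vs.count k : Int))).sum
      = ((vs.map f).count c : Int) := by
  induction vs with
  | nil => simp
  | cons v t ih =>
    have hsub' : ∀ x ∈ t, x ∈ L := fun x hx => hsub x (List.mem_cons_of_mem _ hx)
    have hsplit : ∀ k : String, ((v :: t).count k : Int)
        = (t.count k : Int) + (if k = v then (1:Int) else 0) := by
      intro k
      rw [List.count_cons]
      by_cases h : k = v
      · simp [h]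
      · simp [h, Ne.symm h]
    calc ((L.filter (fun k => f k == c)).map (fun k => ((v :: t).count k : Int))).sum
        = ((L.filter (fun k => f k == c)).map
            (fun k => (t.count k : Int) + (if k = v then (1:Int) else 0))).sum := by
          congr 1; exact List.map_congr_left (fun k _ => hsplit k)
      _ = ((L.filter (fun k => f k == c)).map (fun k => (t.count k : Int))).sum
            + ((L.filter (fun k => f k == c)).map (fun k => if k = v then (1:Int) else 0)).sum := by
          rw [← List.sum_map_add]
      _ = ((t.map f).count c : Int) + (if v ∈ L.filter (fun k => f k == c) then (1:Int) else 0) := by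
          rw [ih hsub', sum_map_ite_mem _ (hN.filter _)]
      _ = (((v :: t).map f).count c : Int) := by
          simp only [List.mem_filter, List.map_cons]
          rw [List.count_cons]
          by_cases h : f v = c
          · simp [h, hsub v List.mem_cons_self]
          · simp [h]

-- MAIN: relabel-aggregating a counter = counting the relabelled list (same items, same order).
theorem relabel_counter (f : String → String) (vs : List String) :
    (PySem.Dict.counter vs).items.foldl
        (fun d p => d.modify (f p.1) 0 (· + p.2)) PySem.Dict.empty
      = PySem.Dict.counter (vs.map f) := by
  apply dict_eq_of_keys_getD
  · rw [PySem.Dict.keys_foldl_modify_key (PySem.Dict.counter vs).items (fun p => f p.1) 0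
          (fun _ p a => a + p.2) PySem.Dict.empty,
        show PySem.Dict.empty.keys = ([] : List String) from rfl, PySem.Set.update_nil_left]
    exact PySem.Set.nodup_ofList _
  · rw [PySem.Dict.keys_foldl_modify_key (PySem.Dict.counter vs).items (fun p => f p.1) 0
          (fun _ p a => a + p.2) PySem.Dict.empty,
        PySem.Dict.keys_counter, PySem.Dict.items_counter,
        show PySem.Dict.empty.keys = ([] : List String) from rfl, PySem.Set.update_nil_left,
        List.map_map]
    exact ofList_map_ofList f vs
  · intro c
    rw [getD_relabel_fold, PySem.Dict.getD_counter, PySem.Dict.items_counter,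
        List.filter_map, List.map_map]
    have h0 : PySem.Dict.empty.getD c (0 : Int) = 0 := rfl
    rw [h0]
    have := sum_count_filter f vs (PySem.Set.ofList vs) (PySem.Set.nodup_ofList vs)
      (fun v hv => (PySem.Set.mem_ofList vs v).mpr hv) c
    simpa [Function.comp] using this

-- ===== VERDICT (by name: the statement is the Claim_ definition above) =====
theorem grade_counter_spec : Claim_equal_grade_counter := by
  intro rows col _
  unfold Spec_grade_counter
  have hstepf : (fun (d : PySem.Dict String Int) (kv : String × Int) =>
      let k := PySem.Str.strip kv.1
      if k = "" ∨ k = "NULL" then d.modify "(empty/NULL)" 0 (· + kv.2)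
      else if GRADE_LABELS.contains k then
        d.modify (k ++ " – " ++ GRADE_LABELS.getD k "") 0 (· + kv.2)
      else d.modify k 0 (· + kv.2))
      = fun d kv => d.modify (labelCell kv.1) 0 (· + kv.2) := by
    funext d kv
    simp only [labelCell]
    split_ifs <;> rfl
  have hmap : rows.map (fun r =>
      let v := (PySem.Dict.mk r).getD col ""
      labelCell (if v = "" then "" else v))
      = (rows.map (fun r =>
          let v := (PySem.Dict.mk r).getD col ""
          if v = "" then "" else v)).map labelCell := by
    rw [List.map_map]
    simp only [Function.comp_def]
  simp only [grade_counter, grade_counter_alt]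
  rw [hstepf, relabel_counter labelCell _, hmap]
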